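-- pv_equiv track=rewrite | github.com/jamesbrignull/ping-pong-tdd | main.py | ping
-- ===== SOURCE A (Python) =====
-- def ping(arr):
--
--     number_counts = {}
--
--     for item in arr:
--         if item not in number_counts.keys():
--             number_counts[item] = 1
--             continue
--         number_counts[item] +=1
--
--     for key, value in number_counts.items():
--         if value % 2 != 0:
--             return key
-- ===== SOURCE B (Python) =====
-- def ping(arr):
--     for item in arr:
--         if arr.count(item) % 2 != 0:
--             return item
-- ===== Notes on version B (the rewrite author's own statement) =====
-- stated objective: simpler
-- what changed: Drops the count dictionary: a single ordered scan returns the first element whose total occurrence count in arr is odd (count-on-demand instead of building a counter table and re-iterating it).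
import Mathlib
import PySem

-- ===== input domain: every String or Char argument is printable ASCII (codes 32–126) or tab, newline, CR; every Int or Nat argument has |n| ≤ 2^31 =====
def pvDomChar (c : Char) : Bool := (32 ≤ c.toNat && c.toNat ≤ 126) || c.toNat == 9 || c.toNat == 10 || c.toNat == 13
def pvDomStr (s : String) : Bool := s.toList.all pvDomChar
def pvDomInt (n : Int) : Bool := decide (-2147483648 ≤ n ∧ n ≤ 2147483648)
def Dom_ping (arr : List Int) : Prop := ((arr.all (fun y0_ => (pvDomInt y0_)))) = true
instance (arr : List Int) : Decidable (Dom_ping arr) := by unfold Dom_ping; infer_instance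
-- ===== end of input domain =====

-- B drops the count dictionary: one ordered scan returning the first element whose total
-- occurrence count is odd (simpler; no speed claim).

-- ===== PORT A =====
-- the counting loop: `if item not in number_counts.keys(): number_counts[item] = 1  else: number_counts[item] += 1`
def pingCounts (arr : List Int) : PySem.Dict Int Int :=
  arr.foldl
    (fun d item =>
      if d.contains item = false then d.insert item 1
      else d.insert item (d.getD item 0 + 1))
    PySem.Dict.empty

def ping (arr : List Int) : Option Int :=
  -- `for key, value in number_counts.items(): if value % 2 != 0: return key` (falls off → None)
  ((pingCounts arr).items.find? (fun kv => PySem.Int.mod kv.2 2 != 0)).map Prod.fst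

-- ===== PORT B =====
def ping_alt (arr : List Int) : Option Int :=
  -- `for item in arr: if arr.count(item) % 2 != 0: return item`
  -- arr.count(item) is a nonnegative int, so Python's % 2 is Nat mod here (exact)
  arr.find? (fun item => (PySem.List.count arr item) % 2 != 0)

-- ===== PRECONDITION & SPEC =====
def Spec_ping (arr : List Int) (out : Option Int) : Prop := out = ping_alt arr
instance (arr : List Int) (out : Option Int) : Decidable (Spec_ping arr out) := by unfold Spec_ping; infer_instance

-- ===== CLAIM (what is proved, stated in full; the proofs are below) =====
def Claim_equal_ping : Prop := ∀ (arr : List Int), Dom_ping arr → Spec_ping arr (ping arr)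

-- ===== LEMMAS AND PROOFS =====

-- A's counting loop builds exactly the counter
theorem pingCounts_eq_counter (arr : List Int) : pingCounts arr = PySem.Dict.counter arr := by
  unfold pingCounts
  rw [← PySem.Dict.foldl_insert_getD_add_one_eq_counter]
  congr 1
  funext d item
  by_cases h : d.contains item = false
  · rw [if_pos h, PySem.Dict.getD_of_not_contains _ _ h]; norm_num
  · rw [if_neg h]

-- find? over the ordered dedup (set-of-first-occurrences) is find? over the list itself
theorem find?_foldl_add (p : Int → Bool) (xs s : List Int) :
    (List.foldl PySem.Set.add s xs).find? p = (s.find? p).orElse (fun _ => xs.find? p) := by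
  induction xs generalizing s with
  | nil => cases hs : s.find? p <;> simp [Option.orElse, hs]
  | cons x xs ih =>
      simp only [List.foldl_cons, ih, List.find?_cons]
      by_cases hm : s.contains x = true
      · have hadd : PySem.Set.add s x = s := by
          simp [PySem.Set.add]
          simpa using hm
        rw [hadd]
        cases hs : s.find? p with
        | some v => simp [Option.orElse]
        | none =>
            have hx : p x = false := by
              have := List.find?_eq_none.mp hs x (by simpa using hm)
              simpa using this
            simp [Option.orElse, hx]
      · have hadd : PySem.Set.add s x = s ++ [x] := by
          simp [PySem.Set.add]
          simpa using hm
        rw [hadd, List.find?_append]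
        cases hs : s.find? p with
        | some v => simp [Option.orElse]
        | none =>
            cases hx : p x <;> simp [Option.orElse, hx]

theorem find?_ofList (p : Int → Bool) (xs : List Int) :
    (PySem.Set.ofList xs).find? p = xs.find? p := by
  rw [PySem.Set.ofList_eq_foldl, find?_foldl_add]
  rfl

-- the two predicates agree (Int mod 2 of a cast Nat vs Nat mod 2)
theorem pred_eq (arr : List Int) (k : Int) :
    (PySem.Int.mod ((arr.count k : Int)) 2 != 0) = ((PySem.List.count arr k) % 2 != 0) := by
  have h : PySem.Int.mod ((arr.count k : Int)) 2 = ((arr.count k % 2 : Nat) : Int) := by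
    simp [PySem.Int.mod, Int.fmod_eq_emod]
  rw [PySem.List.count_eq, h]
  cases Nat.mod_two_eq_zero_or_one (arr.count k) with
  | inl h0 => simp [h0]
  | inr h1 => simp [h1]

-- ===== VERDICT (by name: the statement is the Claim_ definition above) =====
theorem ping_spec : Claim_equal_ping := by
  intro arr _
  show ping arr = ping_alt arr
  unfold ping ping_alt
  rw [pingCounts_eq_counter, PySem.Dict.items_counter, List.find?_map]
  rw [show ((fun kv : Int × Int => PySem.Int.mod kv.2 2 != 0) ∘
        (fun k => (k, (arr.count k : Int)))) =
      (fun k => (PySem.List.count arr k) % 2 != 0) from funext (fun k => pred_eq arr k)]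
  rw [find?_ofList]
  cases arr.find? (fun k => (PySem.List.count arr k) % 2 != 0) <;> rfl
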